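-- pv_equiv track=rewrite | github.com/Daniel-Q-Truong/CPSC335_Project3 | algo1.py | min_days_to_burn
-- ===== SOURCE A (Python) =====
-- from collections import deque
--
-- def min_days_to_burn(forest):
--     if not forest:
--         return -1
--
--     rows, cols = len(forest), len(forest[0])
--     queue = deque()
--     healthy_trees = 0
--     days = 0
--
--     # Step 1: Collect burned trees and count healthy trees
--     for r in range(rows):
--         for c in range(cols):
--             if forest[r][c] == 2:
--                 queue.append((r, c))
--             elif forest[r][c] == 1:
--                 healthy_trees += 1
--
--     if healthy_trees == 0:
--         return days
--     if not queue:
--         return -1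
--
--     directions = [(-1,0), (1,0), (0,-1), (0,1)]
--
--     # Step 2: BFS
--     while queue:
--         for _ in range(len(queue)):
--             r, c = queue.popleft()
--             for dr, dc in directions:
--                 nr, nc = r + dr, c + dc
--                 if 0 <= nr < rows and 0 <= nc < cols and forest[nr][nc] == 1:
--                     forest[nr][nc] = 2
--                     healthy_trees -= 1
--                     queue.append((nr, nc))
--         if queue:
--             days += 1
--
--     return days if healthy_trees == 0 else -1
-- ===== SOURCE B (Python) =====
-- def min_days_to_burn(forest):
--     if not forest:
--         return -1
--
--     rows, cols = len(forest), len(forest[0])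
--     healthy = sum(1 for r in range(rows) for c in range(cols) if forest[r][c] == 1)
--     has_fire = any(forest[r][c] == 2 for r in range(rows) for c in range(cols))
--
--     if healthy == 0:
--         return 0
--     if not has_fire:
--         return -1
--
--     days = 0
--     while True:
--         to_burn = [(r, c)
--                    for r in range(rows) for c in range(cols)
--                    if forest[r][c] == 1
--                    and any(0 <= r + dr < rows and 0 <= c + dc < cols
--                            and forest[r + dr][c + dc] == 2
--                            for dr, dc in ((-1, 0), (1, 0), (0, -1), (0, 1)))]
--         if not to_burn:
--             break
--         for r, c in to_burn:
--             forest[r][c] = 2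
--         healthy -= len(to_burn)
--         days += 1
--
--     return days if healthy == 0 else -1
-- ===== Notes on version B (the rewrite author's own statement) =====
-- stated objective: alternative
-- what changed: Replaces A's queue-based multi-source BFS entirely with a queue-free fixpoint simulation: each day B rescans the whole grid, collects every healthy cell adjacent to a burned cell, burns them all simultaneously, and counts productive sweeps until the grid stops changing (cellular-automaton style, no queue, no frontier bookkeeping). Both mutate `forest` identically; the proved equivalence is about the return value.
import Mathlib
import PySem

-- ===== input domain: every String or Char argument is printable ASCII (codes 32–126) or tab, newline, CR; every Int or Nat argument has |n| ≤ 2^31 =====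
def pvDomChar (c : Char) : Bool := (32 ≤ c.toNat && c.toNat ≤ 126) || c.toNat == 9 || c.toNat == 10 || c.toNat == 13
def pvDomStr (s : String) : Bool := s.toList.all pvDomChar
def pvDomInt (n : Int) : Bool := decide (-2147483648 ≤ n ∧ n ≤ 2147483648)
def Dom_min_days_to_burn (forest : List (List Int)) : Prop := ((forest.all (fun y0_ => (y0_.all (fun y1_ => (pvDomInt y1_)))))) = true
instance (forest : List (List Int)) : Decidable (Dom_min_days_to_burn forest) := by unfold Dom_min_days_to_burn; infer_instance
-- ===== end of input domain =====

-- B replaces A's queue-based multi-source BFS with a queue-free fixpoint simulation: each day it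
-- rescans the whole grid, burns every healthy cell adjacent to a burned one, and counts productive
-- sweeps; equivalence is about the return value (both Pythons mutate `forest` identically).

-- ===== PORT A =====
-- shared grid helpers (both Pythons read/write cells the same way)
def pvCell (g : List (List Int)) (r c : Int) : Int :=
  (g.getD r.toNat []).getD c.toNat 0

def pvBurn (g : List (List Int)) (r c : Int) : List (List Int) :=
  g.set r.toNat ((g.getD r.toNat []).set c.toNat 2)

def pvDirs : List (Int × Int) := [(-1, 0), (1, 0), (0, -1), (0, 1)]

-- number of healthy (=1) cells; used only as a termination measure
def pvOnes (g : List (List Int)) : Nat := (g.map (fun row => row.count 1)).sum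

-- A's step 1 scan: nested for-loops accumulating (queue, healthy_trees)
def pvScanA (g : List (List Int)) (rows cols : Int) : List (Int × Int) × Int :=
  (PySem.List.pyRange 0 rows 1).foldl (fun s r =>
    (PySem.List.pyRange 0 cols 1).foldl (fun s c =>
      if pvCell g r c = 2 then (s.1 ++ [(r, c)], s.2)
      else if pvCell g r c = 1 then (s.1, s.2 + 1)
      else s) s) ([], 0)

-- A's inner `for dr, dc in directions` body for one popped cell
def pvStepA (rows cols r c : Int)
    (s : List (List Int) × List (Int × Int) × Int) (dirs : List (Int × Int)) :
    List (List Int) × List (Int × Int) × Int :=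
  dirs.foldl (fun s d =>
    let nr := r + d.1
    let nc := c + d.2
    if 0 ≤ nr ∧ nr < rows ∧ 0 ≤ nc ∧ nc < cols ∧ pvCell s.1 nr nc = 1 then
      (pvBurn s.1 nr nc, s.2.1 ++ [(nr, nc)], s.2.2 - 1)
    else s) s

-- termination lemmas for the BFS loops (cited in decreasing_by)
theorem pvStepA_cons (rows cols r c : Int) (s : List (List Int) × List (Int × Int) × Int)
    (d : Int × Int) (ds : List (Int × Int)) :
    pvStepA rows cols r c s (d :: ds) =
      pvStepA rows cols r c
        (if 0 ≤ r + d.1 ∧ r + d.1 < rows ∧ 0 ≤ c + d.2 ∧ c + d.2 < cols ∧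
            pvCell s.1 (r + d.1) (c + d.2) = 1
         then (pvBurn s.1 (r + d.1) (c + d.2), s.2.1 ++ [(r + d.1, c + d.2)], s.2.2 - 1)
         else s) ds := rfl

theorem pvCount_set_two (row : List Int) : ∀ (C : Nat), C < row.length → row.getD C 0 = 1 →
    (row.set C 2).count 1 + 1 = row.count 1 := by
  induction row with
  | nil => intro C h _; simp at h
  | cons a t ih =>
    intro C hC ha
    cases C with
    | zero =>
      simp at ha
      subst ha
      simp
    | succ n =>
      simp at hC ha
      have := ih n hC ha
      simp [List.count_cons]
      omega

theorem pvOnes_set (g : List (List Int)) : ∀ (R : Nat) (row' : List Int), R < g.length →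
    pvOnes (g.set R row') + (g.getD R []).count 1 = pvOnes g + row'.count 1 := by
  induction g with
  | nil => intro R _ h; simp at h
  | cons a t ih =>
    intro R row' hR
    cases R with
    | zero => simp [pvOnes]; omega
    | succ n =>
      simp at hR
      have := ih n row' hR
      simp [pvOnes, List.set] at this ⊢
      omega

theorem pvOnes_burn (g : List (List Int)) (r c : Int) (h : pvCell g r c = 1) :
    pvOnes (pvBurn g r c) + 1 = pvOnes g := by
  unfold pvCell at h
  have hR : r.toNat < g.length := by
    by_contra hR
    rw [List.getD_eq_default _ _ (Nat.le_of_not_lt hR)] at h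
    simp at h
  have hC : c.toNat < (g.getD r.toNat []).length := by
    by_contra hC
    rw [List.getD_eq_default _ _ (Nat.le_of_not_lt hC)] at h
    exact absurd h (by decide)
  have h2 := pvCount_set_two (g.getD r.toNat []) c.toNat hC h
  have h3 := pvOnes_set g r.toNat ((g.getD r.toNat []).set c.toNat 2) hR
  unfold pvBurn
  omega

theorem pvStepA_measure (dirs : List (Int × Int)) (rows cols r c : Int) :
    ∀ g q (h : Int),
      pvOnes (pvStepA rows cols r c (g, q, h) dirs).1 + (pvStepA rows cols r c (g, q, h) dirs).2.1.length
        = pvOnes g + q.length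
      ∧ q.length ≤ (pvStepA rows cols r c (g, q, h) dirs).2.1.length := by
  induction dirs with
  | nil => intro g q h; simp [pvStepA]
  | cons d ds ih =>
    intro g q h
    rw [pvStepA_cons]
    by_cases hg : 0 ≤ r + d.1 ∧ r + d.1 < rows ∧ 0 ≤ c + d.2 ∧ c + d.2 < cols ∧ pvCell g (r + d.1) (c + d.2) = 1
    · rw [if_pos hg]
      have hb := pvOnes_burn g (r + d.1) (c + d.2) hg.2.2.2.2
      have := ih (pvBurn g (r + d.1) (c + d.2)) (q ++ [(r + d.1, c + d.2)]) (h - 1)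
      simp at this ⊢
      omega
    · rw [if_neg hg]
      exact ih g q h

-- A's inner `for _ in range(len(queue))` loop: process n pops
def pvInnerA (rows cols : Int) :
    Nat → List (List Int) × List (Int × Int) × Int → List (List Int) × List (Int × Int) × Int
  | 0, s => s
  | n + 1, s =>
    match s.2.1 with
    | [] => s  -- unreachable: the count equals the queue length when entered
    | (r, c) :: rest => pvInnerA rows cols n (pvStepA rows cols r c (s.1, rest, s.2.2) pvDirs)

theorem pvInnerA_ones (rows cols : Int) :
    ∀ (n : Nat) (g : List (List Int)) (q : List (Int × Int)) (h : Int), n ≤ q.length →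
      pvOnes (pvInnerA rows cols n (g, q, h)).1 + (pvInnerA rows cols n (g, q, h)).2.1.length + n
        = pvOnes g + q.length := by
  intro n
  induction n with
  | zero => intro g q h _; simp [pvInnerA]
  | succ m ih =>
    intro g q h hn
    match q with
    | [] => simp at hn
    | (r, c) :: rest =>
      have hm := pvStepA_measure pvDirs rows cols r c g rest h
      show pvOnes (pvInnerA rows cols m (pvStepA rows cols r c (g, rest, h) pvDirs)).1 +
          (pvInnerA rows cols m (pvStepA rows cols r c (g, rest, h) pvDirs)).2.1.length + (m + 1)
        = pvOnes g + ((r, c) :: rest).length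
      have heq : pvStepA rows cols r c (g, rest, h) pvDirs
          = ((pvStepA rows cols r c (g, rest, h) pvDirs).1,
             (pvStepA rows cols r c (g, rest, h) pvDirs).2.1,
             (pvStepA rows cols r c (g, rest, h) pvDirs).2.2) := rfl
      rw [heq]
      have hle : m ≤ (pvStepA rows cols r c (g, rest, h) pvDirs).2.1.length := by
        simp at hn; omega
      have := ih (pvStepA rows cols r c (g, rest, h) pvDirs).1
        (pvStepA rows cols r c (g, rest, h) pvDirs).2.1
        (pvStepA rows cols r c (g, rest, h) pvDirs).2.2 hle
      simp at this ⊢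
      omega

-- A's outer `while queue` loop; returns (healthy_trees, days)
def pvOuterA (rows cols : Int) (g : List (List Int)) (q : List (Int × Int)) (h days : Int) :
    Int × Int :=
  match q with
  | [] => (h, days)
  | x :: xs =>
    let s := pvInnerA rows cols (x :: xs).length (g, x :: xs, h)
    pvOuterA rows cols s.1 s.2.1 s.2.2 (if s.2.1 = [] then days else days + 1)
  termination_by pvOnes g + q.length
  decreasing_by
    have := pvInnerA_ones rows cols (x :: xs).length g (x :: xs) h (le_refl _)
    simp only [List.length_cons] at this ⊢
    omega

def min_days_to_burn (forest : List (List Int)) : Int :=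
  if forest = [] then -1
  else
    let rows : Int := (forest.length : Int)
    let cols : Int := ((forest.headD []).length : Int)
    let s := pvScanA forest rows cols
    if s.2 = 0 then 0
    else if s.1 = [] then -1
    else
      let r := pvOuterA rows cols forest s.1 s.2 0
      if r.1 = 0 then r.2 else -1

-- ===== PORT B =====
-- B's healthy-count generator sum
def pvHealthyB (g : List (List Int)) (rows cols : Int) : Int :=
  ((PySem.List.pyRange 0 rows 1).map (fun r =>
    (((PySem.List.pyRange 0 cols 1).filter (fun c => pvCell g r c = 1)).length : Int))).sum

-- B's `any(forest[r][c] == 2 ...)` generator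
def pvHasFireB (g : List (List Int)) (rows cols : Int) : Bool :=
  (PySem.List.pyRange 0 rows 1).any (fun r =>
    (PySem.List.pyRange 0 cols 1).any (fun c => pvCell g r c == 2))

-- B's `any(... forest[nr][nc] == 2 ...)` neighbour test
def pvHasNb2 (g : List (List Int)) (rows cols r c : Int) : Bool :=
  pvDirs.any (fun d =>
    decide (0 ≤ r + d.1) && decide (r + d.1 < rows) && decide (0 ≤ c + d.2) &&
    decide (c + d.2 < cols) && (pvCell g (r + d.1) (c + d.2) == 2))

-- B's `to_burn` comprehension
def pvToBurn (g : List (List Int)) (rows cols : Int) : List (Int × Int) :=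
  (PySem.List.pyRange 0 rows 1).flatMap (fun r =>
    ((PySem.List.pyRange 0 cols 1).filter (fun c =>
        (pvCell g r c == 1) && pvHasNb2 g rows cols r c)).map (fun c => (r, c)))

-- B's `for r, c in to_burn: forest[r][c] = 2`
def pvBurnAll (g : List (List Int)) (L : List (Int × Int)) : List (List Int) :=
  L.foldl (fun g p => pvBurn g p.1 p.2) g

-- termination lemmas for the sweep loop (cited in decreasing_by)
theorem pvCount_set_two_le (row : List Int) : ∀ (C : Nat),
    (row.set C 2).count 1 ≤ row.count 1 := by
  induction row with
  | nil => intro C; simp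
  | cons a t ih =>
    intro C
    cases C with
    | zero =>
      simp [List.count_cons]
    | succ n =>
      simp [List.count_cons]
      have := ih n
      omega

theorem pvOnes_burn_le (g : List (List Int)) (r c : Int) :
    pvOnes (pvBurn g r c) ≤ pvOnes g := by
  by_cases hR : r.toNat < g.length
  · have h3 := pvOnes_set g r.toNat ((g.getD r.toNat []).set c.toNat 2) hR
    have h2 := pvCount_set_two_le (g.getD r.toNat []) c.toNat
    unfold pvBurn
    omega
  · unfold pvBurn
    rw [List.set_eq_of_length_le (Nat.le_of_not_lt hR)]

theorem pvOnes_burnAll_le (L : List (Int × Int)) :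
    ∀ (g : List (List Int)), pvOnes (pvBurnAll g L) ≤ pvOnes g := by
  induction L with
  | nil => intro g; simp [pvBurnAll]
  | cons p rest ih =>
    intro g
    have h1 := pvOnes_burn_le g p.1 p.2
    have h2 := ih (pvBurn g p.1 p.2)
    calc pvOnes (pvBurnAll g (p :: rest)) = pvOnes (pvBurnAll (pvBurn g p.1 p.2) rest) := rfl
      _ ≤ pvOnes (pvBurn g p.1 p.2) := h2
      _ ≤ pvOnes g := h1

theorem pvToBurn_cell_one (g : List (List Int)) (rows cols : Int) :
    ∀ p ∈ pvToBurn g rows cols, pvCell g p.1 p.2 = 1 := by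
  intro p hp
  unfold pvToBurn at hp
  simp only [List.mem_flatMap, List.mem_map, List.mem_filter] at hp
  obtain ⟨r, _, c, ⟨_, hc⟩, rfl⟩ := hp
  simp at hc
  exact hc.1

theorem pvSweep_decr (g : List (List Int)) (rows cols : Int)
    (hne : pvToBurn g rows cols ≠ []) :
    pvOnes (pvBurnAll g (pvToBurn g rows cols)) < pvOnes g := by
  match hL : pvToBurn g rows cols with
  | [] => exact absurd hL hne
  | p :: rest =>
    have h1 : pvCell g p.1 p.2 = 1 :=
      pvToBurn_cell_one g rows cols p (by rw [hL]; exact List.mem_cons_self)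
    have hb := pvOnes_burn g p.1 p.2 h1
    have h2 := pvOnes_burnAll_le rest (pvBurn g p.1 p.2)
    calc pvOnes (pvBurnAll g (p :: rest)) = pvOnes (pvBurnAll (pvBurn g p.1 p.2) rest) := rfl
      _ ≤ pvOnes (pvBurn g p.1 p.2) := h2
      _ < pvOnes g := by omega

-- B's `while True` sweep loop; returns (healthy, days)
def pvSweep (rows cols : Int) (g : List (List Int)) (healthy days : Int) : Int × Int :=
  let tb := pvToBurn g rows cols
  if h : tb = [] then (healthy, days)
  else pvSweep rows cols (pvBurnAll g tb) (healthy - tb.length) (days + 1)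
  termination_by pvOnes g
  decreasing_by
    exact pvSweep_decr g rows cols h

def min_days_to_burn_alt (forest : List (List Int)) : Int :=
  if forest = [] then -1
  else
    let rows : Int := (forest.length : Int)
    let cols : Int := ((forest.headD []).length : Int)
    let healthy := pvHealthyB forest rows cols
    let hasFire := pvHasFireB forest rows cols
    if healthy = 0 then 0
    else if hasFire = false then -1
    else
      let r := pvSweep rows cols forest healthy 0
      if r.1 = 0 then r.2 else -1

-- ===== PRECONDITION & SPEC =====
-- Pre_ excludes ragged grids in which some row is shorter than row 0: there Python A (and B)
-- raises IndexError reading forest[r][c].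
def Pre_min_days_to_burn (forest : List (List Int)) : Prop :=
  ∀ row ∈ forest, (forest.headD []).length ≤ row.length
instance (forest : List (List Int)) : Decidable (Pre_min_days_to_burn forest) := by
  unfold Pre_min_days_to_burn; infer_instance

def pvWitness_min_days_to_burn : List (List Int) := [[2, 1], [0, 1]]

def Spec_min_days_to_burn (forest : List (List Int)) (out : Int) : Prop := out = min_days_to_burn_alt forest
instance (forest : List (List Int)) (out : Int) : Decidable (Spec_min_days_to_burn forest out) := by unfold Spec_min_days_to_burn; infer_instance

-- ===== CLAIM (what is proved, stated in full; the proofs are below) =====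
def Claim_equal_min_days_to_burn : Prop := ∀ (forest : List (List Int)), Dom_min_days_to_burn forest → Pre_min_days_to_burn forest → Spec_min_days_to_burn forest (min_days_to_burn forest)

-- ===== LEMMAS AND PROOFS =====

-- grid shape invariant: `rows` rows, each at least `cols` wide
def pvGOK (rows cols : Int) (g : List (List Int)) : Prop :=
  (g.length : Int) = rows ∧ ∀ row ∈ g, cols ≤ (row.length : Int)

-- in-range cell
def pvInR (rows cols : Int) (p : Int × Int) : Prop :=
  0 ≤ p.1 ∧ p.1 < rows ∧ 0 ≤ p.2 ∧ p.2 < cols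

theorem pvGetD_set_self (l : List (List Int)) (n : Nat) (a : List Int) (h : n < l.length) :
    (l.set n a).getD n [] = a := by
  rw [List.getD_eq_getElem?_getD, List.getElem?_set_self (by omega)]
  simp

theorem pvGetD_set_ne (l : List (List Int)) (n m : Nat) (a : List Int) (h : n ≠ m) :
    (l.set n a).getD m [] = l.getD m [] := by
  rw [List.getD_eq_getElem?_getD, List.getElem?_set_ne h, ← List.getD_eq_getElem?_getD]

theorem pvRowGetD_set_self (l : List Int) (n : Nat) (a : Int) (h : n < l.length) :
    (l.set n a).getD n 0 = a := by
  rw [List.getD_eq_getElem?_getD, List.getElem?_set_self (by omega)]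
  simp

theorem pvRowGetD_set_ne (l : List Int) (n m : Nat) (a : Int) (h : n ≠ m) :
    (l.set n a).getD m 0 = l.getD m 0 := by
  rw [List.getD_eq_getElem?_getD, List.getElem?_set_ne h, ← List.getD_eq_getElem?_getD]

theorem pvGetD_mem (l : List (List Int)) (n : Nat) (h : n < l.length) : l.getD n [] ∈ l := by
  rw [List.getD_eq_getElem _ _ (by simpa using h)]
  exact List.getElem_mem _

theorem pvGOK_burn (rows cols : Int) (g : List (List Int)) (r c : Int)
    (hG : pvGOK rows cols g) : pvGOK rows cols (pvBurn g r c) := by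
  obtain ⟨h1, h2⟩ := hG
  by_cases hR : r.toNat < g.length
  · refine ⟨by simpa [pvBurn] using h1, ?_⟩
    intro row hrow
    rcases List.mem_or_eq_of_mem_set hrow with h | h
    · exact h2 row h
    · subst h
      rw [List.length_set]
      exact h2 _ (pvGetD_mem _ _ hR)
  · unfold pvBurn
    rw [List.set_eq_of_length_le (Nat.le_of_not_lt hR)]
    exact ⟨h1, h2⟩

theorem pvGOK_burnAll (rows cols : Int) (L : List (Int × Int)) :
    ∀ (g : List (List Int)), pvGOK rows cols g → pvGOK rows cols (pvBurnAll g L) := by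
  induction L with
  | nil => intro g hG; exact hG
  | cons p rest ih => intro g hG; exact ih _ (pvGOK_burn rows cols g p.1 p.2 hG)

theorem pvCell_burn (rows cols : Int) (g : List (List Int)) (p x : Int × Int)
    (hG : pvGOK rows cols g) (hp : pvInR rows cols p) (hx1 : 0 ≤ x.1) (hx2 : 0 ≤ x.2) :
    pvCell (pvBurn g p.1 p.2) x.1 x.2 = if x = p then 2 else pvCell g x.1 x.2 := by
  obtain ⟨hlen, hwide⟩ := hG
  obtain ⟨hp1, hp2, hp3, hp4⟩ := hp
  have hR : p.1.toNat < g.length := by omega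
  have hC : p.2.toNat < (g.getD p.1.toNat []).length := by
    have := hwide _ (pvGetD_mem _ _ hR)
    omega
  by_cases hxp : x = p
  · rw [if_pos hxp, hxp]
    unfold pvCell pvBurn
    rw [pvGetD_set_self _ _ _ hR, pvRowGetD_set_self _ _ _ hC]
  · rw [if_neg hxp]
    unfold pvCell pvBurn
    by_cases h1 : x.1.toNat = p.1.toNat
    · have hx1p : x.1 = p.1 := by omega
      have h2 : x.2.toNat ≠ p.2.toNat := by
        intro hc
        exact hxp (Prod.ext hx1p (by omega))
      rw [h1, pvGetD_set_self _ _ _ hR, pvRowGetD_set_ne _ _ _ _ (Ne.symm h2)]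
    · rw [pvGetD_set_ne _ _ _ _ (Ne.symm h1)]

theorem pvCell_burnAll (rows cols : Int) (L : List (Int × Int)) :
    ∀ (g : List (List Int)) (x : Int × Int), pvGOK rows cols g →
      (∀ q ∈ L, pvInR rows cols q) → 0 ≤ x.1 → 0 ≤ x.2 →
      pvCell (pvBurnAll g L) x.1 x.2 = if x ∈ L then 2 else pvCell g x.1 x.2 := by
  induction L with
  | nil => intro g x _ _ _ _; simp [pvBurnAll]
  | cons p rest ih =>
    intro g x hG hL hx1 hx2
    have hstep : pvBurnAll g (p :: rest) = pvBurnAll (pvBurn g p.1 p.2) rest := rfl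
    rw [hstep, ih _ x (pvGOK_burn rows cols g p.1 p.2 hG) (fun q hq => hL q (List.mem_cons_of_mem _ hq)) hx1 hx2]
    rw [pvCell_burn rows cols g p x hG (hL p List.mem_cons_self) hx1 hx2]
    by_cases hxr : x ∈ rest
    · simp [hxr]
    · by_cases hxp : x = p
      · simp [hxp]
      · simp [hxr, hxp]

-- burning commutes and is order-independent
theorem pvBurn_out (g : List (List Int)) (r c : Int) (h : g.length ≤ r.toNat) :
    pvBurn g r c = g := by
  unfold pvBurn; exact List.set_eq_of_length_le h

theorem pvBurn_comm (g : List (List Int)) (r c r' c' : Int) :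
    pvBurn (pvBurn g r c) r' c' = pvBurn (pvBurn g r' c') r c := by
  by_cases hR : r.toNat < g.length
  · by_cases hR' : r'.toNat < g.length
    · by_cases hRR : r.toNat = r'.toNat
      · unfold pvBurn
        rw [← hRR, pvGetD_set_self _ _ _ hR, pvGetD_set_self _ _ _ hR,
            List.set_set, List.set_set]
        by_cases hCC : c.toNat = c'.toNat
        · rw [hCC]
        · rw [List.set_comm _ _ hCC]
      · unfold pvBurn
        rw [pvGetD_set_ne _ _ _ _ hRR, pvGetD_set_ne _ _ _ _ (Ne.symm hRR),
            List.set_comm _ _ hRR]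
    · rw [pvBurn_out g r' c' (Nat.le_of_not_lt hR'),
          pvBurn_out (pvBurn g r c) r' c' (by simpa [pvBurn] using Nat.le_of_not_lt hR')]
  · rw [pvBurn_out g r c (Nat.le_of_not_lt hR),
        pvBurn_out (pvBurn g r' c') r c (by simpa [pvBurn] using Nat.le_of_not_lt hR)]

theorem pvBurnAll_perm (g : List (List Int)) (L1 L2 : List (Int × Int)) (p : L1.Perm L2) :
    pvBurnAll g L1 = pvBurnAll g L2 := by
  unfold pvBurnAll
  exact @List.Perm.foldl_eq _ _ (fun gg pp => pvBurn gg pp.1 pp.2) L1 L2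
    ⟨fun b a1 a2 => pvBurn_comm b a1.1 a1.2 a2.1 a2.2⟩ p g

theorem pvBurnAll_append (g : List (List Int)) (L1 L2 : List (Int × Int)) :
    pvBurnAll g (L1 ++ L2) = pvBurnAll (pvBurnAll g L1) L2 := by
  unfold pvBurnAll; rw [List.foldl_append]

-- the newly burned neighbours of one popped cell, in processing order
def pvNbs (rows cols r c : Int) (g : List (List Int)) : List (Int × Int) → List (Int × Int)
  | [] => []
  | d :: ds =>
    if 0 ≤ r + d.1 ∧ r + d.1 < rows ∧ 0 ≤ c + d.2 ∧ c + d.2 < cols ∧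
        pvCell g (r + d.1) (c + d.2) = 1 then
      (r + d.1, c + d.2) :: pvNbs rows cols r c (pvBurn g (r + d.1) (c + d.2)) ds
    else pvNbs rows cols r c g ds

theorem pvStepA_nbs (dirs : List (Int × Int)) (rows cols r c : Int) :
    ∀ (g : List (List Int)) (q : List (Int × Int)) (h : Int),
      pvStepA rows cols r c (g, q, h) dirs =
        (pvBurnAll g (pvNbs rows cols r c g dirs),
         q ++ pvNbs rows cols r c g dirs,
         h - (pvNbs rows cols r c g dirs).length) := by
  induction dirs with
  | nil => intro g q h; simp [pvStepA, pvNbs, pvBurnAll]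
  | cons d ds ih =>
    intro g q h
    rw [pvStepA_cons]
    dsimp only
    by_cases hc : 0 ≤ r + d.1 ∧ r + d.1 < rows ∧ 0 ≤ c + d.2 ∧ c + d.2 < cols ∧
        pvCell g (r + d.1) (c + d.2) = 1
    · rw [if_pos hc, ih]
      have hN : pvNbs rows cols r c g (d :: ds)
          = (r + d.1, c + d.2) :: pvNbs rows cols r c (pvBurn g (r + d.1) (c + d.2)) ds := by
        simp only [pvNbs, if_pos hc]
      rw [hN]
      have hB : pvBurnAll g ((r + d.1, c + d.2) :: pvNbs rows cols r c (pvBurn g (r + d.1) (c + d.2)) ds)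
          = pvBurnAll (pvBurn g (r + d.1) (c + d.2)) (pvNbs rows cols r c (pvBurn g (r + d.1) (c + d.2)) ds) := rfl
      rw [hB]
      refine Prod.ext rfl (Prod.ext (by simp) ?_)
      simp only [List.length_cons]
      push_cast
      ring
    · rw [if_neg hc, ih]
      have hN : pvNbs rows cols r c g (d :: ds) = pvNbs rows cols r c g ds := by
        simp only [pvNbs, if_neg hc]
      rw [hN]

theorem pvNbs_sublist (dirs : List (Int × Int)) (rows cols r c : Int) :
    ∀ (g : List (List Int)),
      (pvNbs rows cols r c g dirs).Sublist (dirs.map (fun d => (r + d.1, c + d.2))) := by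
  induction dirs with
  | nil => intro g; simp [pvNbs]
  | cons d ds ih =>
    intro g
    by_cases hc : 0 ≤ r + d.1 ∧ r + d.1 < rows ∧ 0 ≤ c + d.2 ∧ c + d.2 < cols ∧
        pvCell g (r + d.1) (c + d.2) = 1
    · simp only [pvNbs, if_pos hc, List.map_cons]
      exact (ih _).cons₂ _
    · simp only [pvNbs, if_neg hc, List.map_cons]
      exact (ih g).cons _

theorem pvNbs_mem (dirs : List (Int × Int)) (rows cols r c : Int) :
    ∀ (g : List (List Int)), pvGOK rows cols g →
      (dirs.map (fun d => (r + d.1, c + d.2))).Nodup →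
      ∀ (x : Int × Int),
        (x ∈ pvNbs rows cols r c g dirs ↔
          (∃ d ∈ dirs, x = (r + d.1, c + d.2)) ∧ pvInR rows cols x ∧ pvCell g x.1 x.2 = 1) := by
  induction dirs with
  | nil => intro g _ _ x; simp [pvNbs]
  | cons d ds ih =>
    intro g hG hnd x
    rw [List.map_cons, List.nodup_cons] at hnd
    obtain ⟨hnmem, hnd'⟩ := hnd
    by_cases hc : 0 ≤ r + d.1 ∧ r + d.1 < rows ∧ 0 ≤ c + d.2 ∧ c + d.2 < cols ∧
        pvCell g (r + d.1) (c + d.2) = 1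
    · have hInRn : pvInR rows cols (r + d.1, c + d.2) := ⟨hc.1, hc.2.1, hc.2.2.1, hc.2.2.2.1⟩
      have hEq : pvNbs rows cols r c g (d :: ds)
          = (r + d.1, c + d.2) :: pvNbs rows cols r c (pvBurn g (r + d.1) (c + d.2)) ds := by
        simp only [pvNbs, if_pos hc]
      have hG' := pvGOK_burn rows cols g (r + d.1) (c + d.2) hG
      rw [hEq]
      constructor
      · intro hx
        rcases List.mem_cons.mp hx with hx | hx
        · subst hx
          exact ⟨⟨d, List.mem_cons_self, rfl⟩, hInRn, hc.2.2.2.2⟩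
        · obtain ⟨⟨d', hd', hxe⟩, hInR, hcell⟩ := (ih _ hG' hnd' x).mp hx
          have hxn : x ≠ (r + d.1, c + d.2) := by
            intro hcon
            apply hnmem
            rw [← hcon, hxe]
            exact List.mem_map_of_mem hd'
          rw [pvCell_burn rows cols g (r + d.1, c + d.2) x hG hInRn hInR.1 hInR.2.2.1,
              if_neg hxn] at hcell
          exact ⟨⟨d', List.mem_cons_of_mem _ hd', hxe⟩, hInR, hcell⟩
      · rintro ⟨⟨d', hd', hxe⟩, hInR, hcell⟩
        rcases List.mem_cons.mp hd' with rfl | hd'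
        · rw [hxe]
          exact List.mem_cons_self
        · have hxn : x ≠ (r + d.1, c + d.2) := by
            intro hcon
            apply hnmem
            rw [← hcon, hxe]
            exact List.mem_map_of_mem hd'
          apply List.mem_cons_of_mem
          apply (ih _ hG' hnd' x).mpr
          refine ⟨⟨d', hd', hxe⟩, hInR, ?_⟩
          rw [pvCell_burn rows cols g (r + d.1, c + d.2) x hG hInRn hInR.1 hInR.2.2.1,
              if_neg hxn]
          exact hcell
    · have hEq : pvNbs rows cols r c g (d :: ds) = pvNbs rows cols r c g ds := by
        simp only [pvNbs, if_neg hc]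
      rw [hEq, ih g hG hnd' x]
      constructor
      · rintro ⟨⟨d', hd', hxe⟩, hInR, hcell⟩
        exact ⟨⟨d', List.mem_cons_of_mem _ hd', hxe⟩, hInR, hcell⟩
      · rintro ⟨⟨d', hd', hxe⟩, hInR, hcell⟩
        rcases List.mem_cons.mp hd' with rfl | hd'
        · exfalso
          apply hc
          rw [hxe] at hInR hcell
          exact ⟨hInR.1, hInR.2.1, hInR.2.2.1, hInR.2.2.2, hcell⟩
        · exact ⟨⟨d', hd', hxe⟩, hInR, hcell⟩

theorem pvDirs_pos_nodup (r c : Int) :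
    (pvDirs.map (fun d => (r + d.1, c + d.2))).Nodup := by
  simp [pvDirs, Prod.ext_iff]

theorem pvNbs_nodup (rows cols r c : Int) (g : List (List Int)) :
    (pvNbs rows cols r c g pvDirs).Nodup :=
  (pvNbs_sublist pvDirs rows cols r c g).nodup (pvDirs_pos_nodup r c)

theorem pvDirs_neg : ∀ d ∈ pvDirs, ∃ d' ∈ pvDirs, d'.1 = -d.1 ∧ d'.2 = -d.2 := by
  intro d hd
  fin_cases hd
  · exact ⟨(1, 0), by simp [pvDirs], by norm_num⟩
  · exact ⟨(-1, 0), by simp [pvDirs], by norm_num⟩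
  · exact ⟨(0, 1), by simp [pvDirs], by norm_num⟩
  · exact ⟨(0, -1), by simp [pvDirs], by norm_num⟩

-- the list of all cells burned while A processes one whole BFS level `q`
def pvLevel (rows cols : Int) (g : List (List Int)) : List (Int × Int) → List (Int × Int)
  | [] => []
  | (r, c) :: rest =>
    pvNbs rows cols r c g pvDirs ++
      pvLevel rows cols (pvBurnAll g (pvNbs rows cols r c g pvDirs)) rest

theorem pvInnerA_succ (rows cols : Int) (n : Nat) (g : List (List Int)) (r c : Int)
    (rest : List (Int × Int)) (h : Int) :
    pvInnerA rows cols (n + 1) (g, (r, c) :: rest, h)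
      = pvInnerA rows cols n (pvStepA rows cols r c (g, rest, h) pvDirs) := rfl

theorem pvInnerA_level (rows cols : Int) (q : List (Int × Int)) :
    ∀ (g : List (List Int)) (extra : List (Int × Int)) (h : Int),
      pvInnerA rows cols q.length (g, q ++ extra, h)
        = (pvBurnAll g (pvLevel rows cols g q),
           extra ++ pvLevel rows cols g q,
           h - (pvLevel rows cols g q).length) := by
  induction q with
  | nil => intro g extra h; simp [pvInnerA, pvLevel, pvBurnAll]
  | cons p rest ih =>
    obtain ⟨r, c⟩ := p
    intro g extra h
    rw [List.cons_append, List.length_cons, pvInnerA_succ,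
        pvStepA_nbs pvDirs rows cols r c g (rest ++ extra) h]
    have hq : (rest ++ extra) ++ pvNbs rows cols r c g pvDirs
        = rest ++ (extra ++ pvNbs rows cols r c g pvDirs) := by
      rw [List.append_assoc]
    rw [hq, ih (pvBurnAll g (pvNbs rows cols r c g pvDirs))
          (extra ++ pvNbs rows cols r c g pvDirs)
          (h - (pvNbs rows cols r c g pvDirs).length)]
    have hL : pvLevel rows cols g ((r, c) :: rest)
        = pvNbs rows cols r c g pvDirs ++
            pvLevel rows cols (pvBurnAll g (pvNbs rows cols r c g pvDirs)) rest := by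
      simp only [pvLevel]
    rw [hL, pvBurnAll_append]
    refine Prod.ext rfl (Prod.ext (by simp) ?_)
    simp only [List.length_append]
    push_cast
    ring

theorem pvLevel_mem (rows cols : Int) (q : List (Int × Int)) :
    ∀ (g : List (List Int)), pvGOK rows cols g → ∀ (x : Int × Int),
      (x ∈ pvLevel rows cols g q ↔
        pvInR rows cols x ∧ pvCell g x.1 x.2 = 1 ∧
          ∃ y ∈ q, ∃ d ∈ pvDirs, x = (y.1 + d.1, y.2 + d.2)) := by
  induction q with
  | nil => intro g _ x; simp [pvLevel]
  | cons p rest ih =>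
    obtain ⟨r, c⟩ := p
    intro g hG x
    have hP0mem := pvNbs_mem pvDirs rows cols r c g hG (pvDirs_pos_nodup r c)
    have hP0InR : ∀ p ∈ pvNbs rows cols r c g pvDirs, pvInR rows cols p :=
      fun p hp => ((hP0mem p).mp hp).2.1
    have hG1 := pvGOK_burnAll rows cols (pvNbs rows cols r c g pvDirs) g hG
    have hL : pvLevel rows cols g ((r, c) :: rest)
        = pvNbs rows cols r c g pvDirs ++
            pvLevel rows cols (pvBurnAll g (pvNbs rows cols r c g pvDirs)) rest := by
      simp only [pvLevel]
    rw [hL]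
    constructor
    · intro hx
      rcases List.mem_append.mp hx with hx | hx
      · obtain ⟨⟨d, hd, hxe⟩, hInR, hcell⟩ := (hP0mem x).mp hx
        exact ⟨hInR, hcell, (r, c), List.mem_cons_self, d, hd, by simpa using hxe⟩
      · obtain ⟨hInR, hcell1, y, hy, d, hd, hxe⟩ := (ih _ hG1 x).mp hx
        have hcb := pvCell_burnAll rows cols (pvNbs rows cols r c g pvDirs) g x hG hP0InR
          hInR.1 hInR.2.2.1
        by_cases hxP : x ∈ pvNbs rows cols r c g pvDirs
        · rw [hcb, if_pos hxP] at hcell1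
          exact absurd hcell1 (by decide)
        · rw [hcb, if_neg hxP] at hcell1
          exact ⟨hInR, hcell1, y, List.mem_cons_of_mem _ hy, d, hd, hxe⟩
    · rintro ⟨hInR, hcellg, y, hy, d, hd, hxe⟩
      rcases List.mem_cons.mp hy with rfl | hy
      · apply List.mem_append_left
        exact (hP0mem x).mpr ⟨⟨d, hd, by simpa using hxe⟩, hInR, hcellg⟩
      · by_cases hxP : x ∈ pvNbs rows cols r c g pvDirs
        · exact List.mem_append_left _ hxP
        · apply List.mem_append_right
          apply (ih _ hG1 x).mpr
          have hcb := pvCell_burnAll rows cols (pvNbs rows cols r c g pvDirs) g x hG hP0InR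
            hInR.1 hInR.2.2.1
          rw [if_neg hxP] at hcb
          exact ⟨hInR, by rw [hcb]; exact hcellg, y, hy, d, hd, hxe⟩

theorem pvLevel_nodup (rows cols : Int) (q : List (Int × Int)) :
    ∀ (g : List (List Int)), pvGOK rows cols g → (pvLevel rows cols g q).Nodup := by
  induction q with
  | nil => intro g _; simp [pvLevel]
  | cons p rest ih =>
    obtain ⟨r, c⟩ := p
    intro g hG
    have hP0mem := pvNbs_mem pvDirs rows cols r c g hG (pvDirs_pos_nodup r c)
    have hP0InR : ∀ p ∈ pvNbs rows cols r c g pvDirs, pvInR rows cols p :=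
      fun p hp => ((hP0mem p).mp hp).2.1
    have hG1 := pvGOK_burnAll rows cols (pvNbs rows cols r c g pvDirs) g hG
    have hL : pvLevel rows cols g ((r, c) :: rest)
        = pvNbs rows cols r c g pvDirs ++
            pvLevel rows cols (pvBurnAll g (pvNbs rows cols r c g pvDirs)) rest := by
      simp only [pvLevel]
    rw [hL]
    apply List.Nodup.append (pvNbs_nodup rows cols r c g) (ih _ hG1)
    intro x hxP hxL
    obtain ⟨hInR, hcell1, _⟩ := (pvLevel_mem rows cols rest _ hG1 x).mp hxL
    have hcb := pvCell_burnAll rows cols (pvNbs rows cols r c g pvDirs) g x hG hP0InR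
      hInR.1 hInR.2.2.1
    rw [hcb, if_pos hxP] at hcell1
    exact absurd hcell1 (by decide)

theorem pvOnes_burnAll_ones (rows cols : Int) (L : List (Int × Int)) :
    ∀ (g : List (List Int)), pvGOK rows cols g → L.Nodup →
      (∀ p ∈ L, pvInR rows cols p ∧ pvCell g p.1 p.2 = 1) →
      pvOnes (pvBurnAll g L) + L.length = pvOnes g := by
  induction L with
  | nil => intro g _ _ _; simp [pvBurnAll]
  | cons p rest ih =>
    intro g hG hnd hall
    obtain ⟨hInRp, hcellp⟩ := hall p List.mem_cons_self
    have hb := pvOnes_burn g p.1 p.2 hcellp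
    have hG' := pvGOK_burn rows cols g p.1 p.2 hG
    rw [List.nodup_cons] at hnd
    have hall' : ∀ x ∈ rest, pvInR rows cols x ∧ pvCell (pvBurn g p.1 p.2) x.1 x.2 = 1 := by
      intro x hx
      obtain ⟨hInRx, hcellx⟩ := hall x (List.mem_cons_of_mem _ hx)
      refine ⟨hInRx, ?_⟩
      rw [pvCell_burn rows cols g p x hG hInRp hInRx.1 hInRx.2.2.1,
          if_neg ?_]
      · exact hcellx
      · intro hcon
        rw [hcon] at hx
        exact hnd.1 hx
    have := ih (pvBurn g p.1 p.2) hG' hnd.2 hall'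
    have hstep : pvBurnAll g (p :: rest) = pvBurnAll (pvBurn g p.1 p.2) rest := rfl
    rw [hstep]
    simp only [List.length_cons]
    omega

-- unfold equations for A's outer loop and B's sweep loop
theorem pvOuterA_nil (rows cols : Int) (g : List (List Int)) (h days : Int) :
    pvOuterA rows cols g [] h days = (h, days) := by rw [pvOuterA]

theorem pvOuterA_cons (rows cols : Int) (g : List (List Int)) (x : Int × Int)
    (xs : List (Int × Int)) (h days : Int) :
    pvOuterA rows cols g (x :: xs) h days =
      pvOuterA rows cols
        (pvInnerA rows cols (x :: xs).length (g, x :: xs, h)).1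
        (pvInnerA rows cols (x :: xs).length (g, x :: xs, h)).2.1
        (pvInnerA rows cols (x :: xs).length (g, x :: xs, h)).2.2
        (if (pvInnerA rows cols (x :: xs).length (g, x :: xs, h)).2.1 = [] then days
         else days + 1) := by rw [pvOuterA]

theorem pvSweep_nil (rows cols : Int) (g : List (List Int)) (healthy days : Int)
    (h : pvToBurn g rows cols = []) :
    pvSweep rows cols g healthy days = (healthy, days) := by
  rw [pvSweep]
  simp [h]

theorem pvSweep_step (rows cols : Int) (g : List (List Int)) (healthy days : Int)
    (h : pvToBurn g rows cols ≠ []) :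
    pvSweep rows cols g healthy days =
      pvSweep rows cols (pvBurnAll g (pvToBurn g rows cols))
        (healthy - (pvToBurn g rows cols).length) (days + 1) := by
  rw [pvSweep]
  simp [h]

theorem pvHasNb2_iff (g : List (List Int)) (rows cols r c : Int) :
    (pvHasNb2 g rows cols r c = true ↔
      ∃ d ∈ pvDirs, pvInR rows cols (r + d.1, c + d.2) ∧ pvCell g (r + d.1) (c + d.2) = 2) := by
  simp [pvHasNb2, List.any_eq_true, pvInR, and_assoc]

theorem pvToBurn_mem (g : List (List Int)) (rows cols : Int) (x : Int × Int) :
    (x ∈ pvToBurn g rows cols ↔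
      pvInR rows cols x ∧ pvCell g x.1 x.2 = 1 ∧ pvHasNb2 g rows cols x.1 x.2 = true) := by
  unfold pvToBurn
  simp only [List.mem_flatMap, List.mem_map, List.mem_filter, PySem.List.mem_pyRange_one,
    Bool.and_eq_true, beq_iff_eq]
  constructor
  · rintro ⟨r, ⟨hr1, hr2⟩, c, ⟨⟨hc1, hc2⟩, h1, h2⟩, rfl⟩
    exact ⟨⟨hr1, hr2, hc1, hc2⟩, h1, h2⟩
  · rintro ⟨⟨h1, h2, h3, h4⟩, h5, h6⟩
    exact ⟨x.1, ⟨h1, h2⟩, x.2, ⟨⟨h3, h4⟩, h5, h6⟩, by simp⟩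

theorem pvToBurn_nodup (g : List (List Int)) (rows cols : Int) :
    (pvToBurn g rows cols).Nodup := by
  unfold pvToBurn
  rw [List.nodup_flatMap]
  constructor
  · intro r _
    apply List.Nodup.map
    · intro a b hab
      simpa using hab
    · exact (PySem.List.nodup_pyRange_one 0 cols).filter _
  · apply (PySem.List.pairwise_lt_pyRange_one 0 rows).imp
    intro a b hab x hxa hxb
    simp only [List.mem_map, List.mem_filter] at hxa hxb
    obtain ⟨ca, _, rfl⟩ := hxa
    obtain ⟨cb, _, hcb⟩ := hxb
    have : b = a := congrArg Prod.fst hcb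
    omega

-- A's initial scan in closed form
def pvBurnedB (g : List (List Int)) (rows cols : Int) : List (Int × Int) :=
  (PySem.List.pyRange 0 rows 1).flatMap (fun r =>
    ((PySem.List.pyRange 0 cols 1).filter (fun c => pvCell g r c = 2)).map (fun c => (r, c)))

theorem pvScan_row (g : List (List Int)) (r : Int) :
    ∀ (cs : List Int) (q0 : List (Int × Int)) (h0 : Int),
      cs.foldl (fun s c =>
          if pvCell g r c = 2 then (s.1 ++ [(r, c)], s.2)
          else if pvCell g r c = 1 then (s.1, s.2 + 1)
          else s) (q0, h0)
        = (q0 ++ (cs.filter (fun c => pvCell g r c = 2)).map (fun c => (r, c)),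
           h0 + ((cs.filter (fun c => pvCell g r c = 1)).length : Int)) := by
  intro cs
  induction cs with
  | nil => intro q0 h0; simp
  | cons c cs ih =>
    intro q0 h0
    rw [List.foldl_cons]
    by_cases h2 : pvCell g r c = 2
    · have h1 : ¬ pvCell g r c = 1 := by rw [h2]; decide
      rw [if_pos h2]
      rw [ih]
      simp [h2]
    · rw [if_neg h2]
      by_cases h1 : pvCell g r c = 1
      · rw [if_pos h1]
        rw [ih]
        simp [h1]
        omega
      · rw [if_neg h1]
        rw [ih]
        simp [h1, h2]

theorem pvScan_eq (g : List (List Int)) (rows cols : Int) :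
    pvScanA g rows cols = (pvBurnedB g rows cols, pvHealthyB g rows cols) := by
  unfold pvScanA pvBurnedB pvHealthyB
  suffices h : ∀ (rs : List Int) (q0 : List (Int × Int)) (h0 : Int),
      rs.foldl (fun s r =>
          (PySem.List.pyRange 0 cols 1).foldl (fun s c =>
            if pvCell g r c = 2 then (s.1 ++ [(r, c)], s.2)
            else if pvCell g r c = 1 then (s.1, s.2 + 1)
            else s) s) (q0, h0)
        = (q0 ++ rs.flatMap (fun r =>
              ((PySem.List.pyRange 0 cols 1).filter (fun c => pvCell g r c = 2)).map
                (fun c => (r, c))),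
           h0 + (rs.map (fun r =>
              ((((PySem.List.pyRange 0 cols 1).filter (fun c => pvCell g r c = 1)).length : Int)))).sum) by
    simpa using h (PySem.List.pyRange 0 rows 1) [] 0
  intro rs
  induction rs with
  | nil => intro q0 h0; simp
  | cons r rs ih =>
    intro q0 h0
    rw [List.foldl_cons, pvScan_row, ih]
    simp
    omega

theorem pvBurnedB_mem (g : List (List Int)) (rows cols : Int) (x : Int × Int) :
    (x ∈ pvBurnedB g rows cols ↔ pvInR rows cols x ∧ pvCell g x.1 x.2 = 2) := by
  unfold pvBurnedB
  simp only [List.mem_flatMap, List.mem_map, List.mem_filter, PySem.List.mem_pyRange_one,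
    decide_eq_true_iff]
  constructor
  · rintro ⟨r, ⟨hr1, hr2⟩, c, ⟨⟨hc1, hc2⟩, h1⟩, rfl⟩
    exact ⟨⟨hr1, hr2, hc1, hc2⟩, h1⟩
  · rintro ⟨⟨h1, h2, h3, h4⟩, h5⟩
    exact ⟨x.1, ⟨h1, h2⟩, x.2, ⟨⟨h3, h4⟩, h5⟩, by simp⟩

theorem pvFire_iff (g : List (List Int)) (rows cols : Int) :
    (pvHasFireB g rows cols = false ↔ pvBurnedB g rows cols = []) := by
  have h1 : pvHasFireB g rows cols = true ↔ ∃ x : Int × Int, pvInR rows cols x ∧ pvCell g x.1 x.2 = 2 := by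
    simp only [pvHasFireB, List.any_eq_true, PySem.List.mem_pyRange_one, beq_iff_eq, pvInR]
    constructor
    · rintro ⟨r, ⟨hr1, hr2⟩, c, ⟨hc1, hc2⟩, h⟩
      exact ⟨(r, c), ⟨hr1, hr2, hc1, hc2⟩, h⟩
    · rintro ⟨x, ⟨h1, h2, h3, h4⟩, h5⟩
      exact ⟨x.1, ⟨h1, h2⟩, x.2, ⟨h3, h4⟩, h5⟩
  constructor
  · intro hf
    rw [List.eq_nil_iff_forall_not_mem]
    intro x hx
    obtain ⟨hInR, hc⟩ := (pvBurnedB_mem g rows cols x).mp hx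
    have : pvHasFireB g rows cols = true := h1.mpr ⟨x, hInR, hc⟩
    rw [hf] at this
    exact absurd this (by decide)
  · intro hnil
    by_contra hf
    have ht : pvHasFireB g rows cols = true := by
      cases hfb : pvHasFireB g rows cols
      · exact absurd hfb hf
      · rfl
    obtain ⟨x, hInR, hc⟩ := h1.mp ht
    have : x ∈ pvBurnedB g rows cols := (pvBurnedB_mem g rows cols x).mpr ⟨hInR, hc⟩
    rw [hnil] at this
    exact absurd this (List.not_mem_nil)

-- A's level loop equals B's sweep loop under the frontier invariants:
-- every queue cell is burned and in range, and every healthy cell next to a burned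
-- cell is next to a queue cell
theorem pvOuter_sweep (rows cols : Int) :
    ∀ (N : Nat) (g : List (List Int)) (q : List (Int × Int)) (h d : Int),
      pvOnes g + q.length ≤ N →
      pvGOK rows cols g →
      (∀ y ∈ q, pvInR rows cols y ∧ pvCell g y.1 y.2 = 2) →
      (∀ x : Int × Int, pvInR rows cols x → pvCell g x.1 x.2 = 1 →
        (∃ dd ∈ pvDirs, pvInR rows cols (x.1 + dd.1, x.2 + dd.2) ∧
            pvCell g (x.1 + dd.1) (x.2 + dd.2) = 2) →
        ∃ y ∈ q, ∃ dd ∈ pvDirs, x = (y.1 + dd.1, y.2 + dd.2)) →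
      pvOuterA rows cols g q h d = pvSweep rows cols g h d := by
  intro N
  induction N with
  | zero =>
    intro g q h d hN hG hJ1 hJ2
    match q with
    | [] =>
      have htb : pvToBurn g rows cols = [] := by
        rw [List.eq_nil_iff_forall_not_mem]
        intro x hx
        obtain ⟨hInR, hcell, hnb⟩ := (pvToBurn_mem g rows cols x).mp hx
        obtain ⟨y, hy, _⟩ := hJ2 x hInR hcell ((pvHasNb2_iff g rows cols x.1 x.2).mp hnb)
        exact absurd hy List.not_mem_nil
      rw [pvOuterA_nil, pvSweep_nil _ _ _ _ _ htb]
    | x :: xs => simp at hN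
  | succ N ih =>
    intro g q h d hN hG hJ1 hJ2
    match q with
    | [] =>
      have htb : pvToBurn g rows cols = [] := by
        rw [List.eq_nil_iff_forall_not_mem]
        intro x hx
        obtain ⟨hInR, hcell, hnb⟩ := (pvToBurn_mem g rows cols x).mp hx
        obtain ⟨y, hy, _⟩ := hJ2 x hInR hcell ((pvHasNb2_iff g rows cols x.1 x.2).mp hnb)
        exact absurd hy List.not_mem_nil
      rw [pvOuterA_nil, pvSweep_nil _ _ _ _ _ htb]
    | x :: xs =>
      have hmem := pvLevel_mem rows cols (x :: xs) g hG
      have hPInR : ∀ p ∈ pvLevel rows cols g (x :: xs), pvInR rows cols p :=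
        fun p hp => ((hmem p).mp hp).1
      have hPnd := pvLevel_nodup rows cols (x :: xs) g hG
      have hperm : (pvToBurn g rows cols).Perm (pvLevel rows cols g (x :: xs)) := by
        rw [List.perm_ext_iff_of_nodup (pvToBurn_nodup g rows cols) hPnd]
        intro z
        rw [pvToBurn_mem, hmem z]
        constructor
        · rintro ⟨hInR, hcell, hnb⟩
          obtain ⟨y, hy, dd', hdd', hze⟩ :=
            hJ2 z hInR hcell ((pvHasNb2_iff g rows cols z.1 z.2).mp hnb)
          exact ⟨hInR, hcell, y, hy, dd', hdd', hze⟩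
        · rintro ⟨hInR, hcell, y, hy, dd, hdd, hze⟩
          refine ⟨hInR, hcell, ?_⟩
          rw [pvHasNb2_iff]
          obtain ⟨yInR, ycell⟩ := hJ1 y hy
          obtain ⟨dd', hdd', hd1, hd2⟩ := pvDirs_neg dd hdd
          have hz1 : z.1 = y.1 + dd.1 := by rw [hze]
          have hz2 : z.2 = y.2 + dd.2 := by rw [hze]
          have he1 : z.1 + dd'.1 = y.1 := by rw [hz1, hd1]; ring
          have he2 : z.2 + dd'.2 = y.2 := by rw [hz2, hd2]; ring
          refine ⟨dd', hdd', ⟨?_, ?_, ?_, ?_⟩, ?_⟩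
          · rw [he1]; exact yInR.1
          · rw [he1]; exact yInR.2.1
          · rw [he2]; exact yInR.2.2.1
          · rw [he2]; exact yInR.2.2.2
          · rw [he1, he2]; exact ycell
      have hinner := pvInnerA_level rows cols (x :: xs) g [] h
      rw [List.append_nil] at hinner
      rw [pvOuterA_cons, hinner]
      dsimp only
      rw [List.nil_append]
      by_cases hP : pvLevel rows cols g (x :: xs) = []
      · have htb : pvToBurn g rows cols = [] := by
          rw [hP] at hperm
          exact hperm.eq_nil
        rw [if_pos hP, hP, pvOuterA_nil, pvSweep_nil _ _ _ _ _ htb]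
        simp
      · have htbne : pvToBurn g rows cols ≠ [] := by
          intro hc
          rw [hc] at hperm
          exact hP hperm.symm.eq_nil
        rw [if_neg hP, pvSweep_step _ _ _ _ _ htbne,
            pvBurnAll_perm g _ _ hperm, hperm.length_eq]
        have hones : pvOnes (pvBurnAll g (pvLevel rows cols g (x :: xs)))
            + (pvLevel rows cols g (x :: xs)).length = pvOnes g :=
          pvOnes_burnAll_ones rows cols _ g hG hPnd
            (fun p hp => ⟨((hmem p).mp hp).1, ((hmem p).mp hp).2.1⟩)
        have hG' := pvGOK_burnAll rows cols (pvLevel rows cols g (x :: xs)) g hG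
        apply ih
        · simp only [List.length_cons] at hN
          omega
        · exact hG'
        · intro y hy
          refine ⟨hPInR y hy, ?_⟩
          rw [pvCell_burnAll rows cols _ g y hG hPInR (hPInR y hy).1 (hPInR y hy).2.2.1,
              if_pos hy]
        · intro z hzInR hz1 hz2nb
          have hzcb := pvCell_burnAll rows cols _ g z hG hPInR hzInR.1 hzInR.2.2.1
          have hzP : z ∉ pvLevel rows cols g (x :: xs) := by
            intro hc
            rw [hzcb, if_pos hc] at hz1
            exact absurd hz1 (by decide)
          rw [hzcb, if_neg hzP] at hz1
          obtain ⟨dd, hdd, hnInR, hn2⟩ := hz2nb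
          have hncb := pvCell_burnAll rows cols _ g (z.1 + dd.1, z.2 + dd.2) hG hPInR
            hnInR.1 hnInR.2.2.1
          by_cases hnP : (z.1 + dd.1, z.2 + dd.2) ∈ pvLevel rows cols g (x :: xs)
          · obtain ⟨dd', hdd', hd1, hd2⟩ := pvDirs_neg dd hdd
            refine ⟨(z.1 + dd.1, z.2 + dd.2), hnP, dd', hdd', ?_⟩
            apply Prod.ext
            · simp [hd1]
            · simp [hd2]
          · rw [hncb, if_neg hnP] at hn2
            obtain ⟨y, hy, dd', hdd', hze⟩ := hJ2 z hzInR hz1 ⟨dd, hdd, hnInR, hn2⟩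
            exact absurd ((hmem z).mpr ⟨hzInR, hz1, y, hy, dd', hdd', hze⟩) hzP

-- ===== VERDICT (by name: the statement is the Claim_ definition above) =====
theorem min_days_to_burn_spec : Claim_equal_min_days_to_burn := by
  intro forest _dom pre
  show min_days_to_burn forest = min_days_to_burn_alt forest
  unfold min_days_to_burn min_days_to_burn_alt
  by_cases hnil : forest = []
  · rw [if_pos hnil, if_pos hnil]
  · rw [if_neg hnil, if_neg hnil]
    dsimp only
    rw [pvScan_eq]
    dsimp only
    by_cases hh : pvHealthyB forest (forest.length : Int) ((forest.headD []).length : Int) = 0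
    · rw [if_pos hh, if_pos hh]
    · rw [if_neg hh, if_neg hh]
      by_cases hfire : pvBurnedB forest (forest.length : Int) ((forest.headD []).length : Int) = []
      · rw [if_pos hfire, if_pos ((pvFire_iff forest _ _).mpr hfire)]
      · have hf' : ¬ pvHasFireB forest (forest.length : Int) ((forest.headD []).length : Int) = false :=
          fun hc => hfire ((pvFire_iff forest _ _).mp hc)
        rw [if_neg hfire, if_neg hf']
        have hGOK : pvGOK (forest.length : Int) ((forest.headD []).length : Int) forest :=
          ⟨rfl, fun row hrow => by exact_mod_cast pre row hrow⟩
        have hJ1 : ∀ y ∈ pvBurnedB forest (forest.length : Int) ((forest.headD []).length : Int),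
            pvInR (forest.length : Int) ((forest.headD []).length : Int) y ∧
              pvCell forest y.1 y.2 = 2 :=
          fun y hy => (pvBurnedB_mem forest _ _ y).mp hy
        have hJ2 : ∀ x : Int × Int,
            pvInR (forest.length : Int) ((forest.headD []).length : Int) x →
            pvCell forest x.1 x.2 = 1 →
            (∃ dd ∈ pvDirs,
                pvInR (forest.length : Int) ((forest.headD []).length : Int)
                  (x.1 + dd.1, x.2 + dd.2) ∧
                pvCell forest (x.1 + dd.1) (x.2 + dd.2) = 2) →
            ∃ y ∈ pvBurnedB forest (forest.length : Int) ((forest.headD []).length : Int),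
              ∃ dd ∈ pvDirs, x = (y.1 + dd.1, y.2 + dd.2) := by
          intro z hInR h1 hnb
          obtain ⟨dd, hdd, hnInR, hn2⟩ := hnb
          obtain ⟨dd', hdd', hd1, hd2⟩ := pvDirs_neg dd hdd
          refine ⟨(z.1 + dd.1, z.2 + dd.2), (pvBurnedB_mem forest _ _ _).mpr ⟨hnInR, hn2⟩,
            dd', hdd', ?_⟩
          apply Prod.ext
          · simp [hd1]
          · simp [hd2]
        rw [pvOuter_sweep (forest.length : Int) ((forest.headD []).length : Int)
              (pvOnes forest +
                (pvBurnedB forest (forest.length : Int) ((forest.headD []).length : Int)).length)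
              forest
              (pvBurnedB forest (forest.length : Int) ((forest.headD []).length : Int))
              (pvHealthyB forest (forest.length : Int) ((forest.headD []).length : Int)) 0
              (le_refl _) hGOK hJ1 hJ2]
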